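-- pv_equiv track=rewrite | github.com/honyelbaz/calculator2 | calculator2/finder.py | range_of_minuses
-- ===== SOURCE A (Python) =====
-- def range_of_minuses(equation, index_of_minus):
--     """
--
--     :param equation: A string representing the equation
--     :param index_of_minus: An index of char that's suppose to be a minus
--     :return: A tuple of two indexes , start of the range and the end
--     of the range
--     """
--     if equation[index_of_minus] != '-':
--         raise Exception("char is not a minus")
--
--     start = index_of_minus
--     finish = index_of_minus
--     #go left
--     while start >= 0 and equation[start] == '-':
--         start -= 1
--     start += 1
--
--     #go right
--     while finish < len(equation) and equation[finish] == '-':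
--         finish += 1
--     finish -= 1
--
--     return start, finish
-- ===== SOURCE B (Python) =====
-- import re
--
-- def range_of_minuses(equation, index_of_minus):
--     if equation[index_of_minus] != '-':
--         raise Exception("char is not a minus")
--     m = next(m for m in re.finditer('-+', equation)
--              if m.start() <= index_of_minus < m.end())
--     return m.start(), m.end() - 1
-- ===== Notes on version B (the rewrite author's own statement) =====
-- stated objective: idiomatic
-- what changed: Replaces the two outward-expanding index while-loops with a regex scan (re.finditer('-+')) over the whole string that enumerates all maximal minus-runs and selects the run whose span contains the index.
-- outside the precondition, e.g. on range_of_minuses('-', -1): A returns (0, 0), B raises StopIteration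
import Mathlib
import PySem

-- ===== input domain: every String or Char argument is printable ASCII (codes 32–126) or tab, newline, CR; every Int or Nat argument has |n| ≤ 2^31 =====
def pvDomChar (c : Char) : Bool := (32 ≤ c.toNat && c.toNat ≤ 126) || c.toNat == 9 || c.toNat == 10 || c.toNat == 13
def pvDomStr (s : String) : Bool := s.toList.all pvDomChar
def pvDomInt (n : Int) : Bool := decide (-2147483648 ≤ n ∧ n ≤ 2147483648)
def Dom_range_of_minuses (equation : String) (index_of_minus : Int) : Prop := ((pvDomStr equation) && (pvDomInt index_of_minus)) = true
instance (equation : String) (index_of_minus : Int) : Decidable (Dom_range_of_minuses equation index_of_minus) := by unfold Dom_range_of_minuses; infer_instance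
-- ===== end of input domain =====

-- B replaces A's two outward-expanding index loops with a single scan that enumerates all
-- maximal minus-runs (Python: re.finditer('-+')) and selects the run containing the index (idiomatic).


-- ===== PORT A =====
-- `while start >= 0 and equation[start] == '-': start -= 1`
def goLeftA (cs : List Char) : Nat → Int → Int
  | 0, s => s
  | fuel + 1, s =>
    if 0 ≤ s ∧ PySem.List.pyGet? cs s = some '-' then goLeftA cs fuel (s - 1) else s

-- `while finish < len(equation) and equation[finish] == '-': finish += 1`
def goRightA (cs : List Char) : Nat → Int → Int
  | 0, f => f
  | fuel + 1, f =>
    if f < (cs.length : Int) ∧ PySem.List.pyGet? cs f = some '-' then goRightA cs fuel (f + 1) else f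

def range_of_minuses (equation : String) (index_of_minus : Int) : Int × Int :=
  let cs := equation.toList
  -- guard `equation[index_of_minus] != '-'` raises outside Pre_
  let start := goLeftA cs (index_of_minus.toNat + 1) index_of_minus + 1
  let finish := goRightA cs (cs.length + 1) index_of_minus - 1
  (start, finish)

-- ===== PORT B =====
-- hand port of re.finditer('-+', equation): the list of (start, end) spans of all
-- maximal runs of '-', in order; exact on the full domain.
def runsB : List Char → Nat → List (Nat × Nat)
  | [], _ => []
  | c :: rest, i =>
    if c = '-' then
      match runsB rest (i + 1) with
      | (s, e) :: tl => if s = i + 1 then (i, e) :: tl else (i, i + 1) :: (s, e) :: tl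
      | [] => [(i, i + 1)]
    else runsB rest (i + 1)

def range_of_minuses_alt (equation : String) (index_of_minus : Int) : Int × Int :=
  let cs := equation.toList
  -- guard `equation[index_of_minus] != '-'` raises outside Pre_
  match (runsB cs 0).find? (fun p => decide ((p.1 : Int) ≤ index_of_minus ∧ index_of_minus < (p.2 : Int))) with
  | some (s, e) => ((s : Int), (e : Int) - 1)
  | none => (0, 0)   -- Python raises StopIteration here; outside Pre_

-- ===== PRECONDITION & SPEC =====
-- Pre_ excludes the inputs where A raises (index out of range, or the indexed char is not '-'),
-- and the negative indices reaching a '-' by Python wraparound, where A returns an accidental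
-- value (the loops then mix wrapped and unwrapped indexing) while B's `next(...)` raises StopIteration.
def Pre_range_of_minuses (equation : String) (index_of_minus : Int) : Prop :=
  0 ≤ index_of_minus ∧ PySem.List.pyGet? equation.toList index_of_minus = some '-'
instance (equation : String) (index_of_minus : Int) : Decidable (Pre_range_of_minuses equation index_of_minus) := by unfold Pre_range_of_minuses; infer_instance

def pvWitness_range_of_minuses : String × Int := ("1--2", 1)

def Spec_range_of_minuses (equation : String) (index_of_minus : Int) (out : Int × Int) : Prop := out = range_of_minuses_alt equation index_of_minus
instance (equation : String) (index_of_minus : Int) (out : Int × Int) : Decidable (Spec_range_of_minuses equation index_of_minus out) := by unfold Spec_range_of_minuses; infer_instance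

-- ===== CLAIM (what is proved, stated in full; the proofs are below) =====
def Claim_equal_range_of_minuses : Prop := ∀ (equation : String) (index_of_minus : Int), Dom_range_of_minuses equation index_of_minus → Pre_range_of_minuses equation index_of_minus → Spec_range_of_minuses equation index_of_minus (range_of_minuses equation index_of_minus)

-- ===== LEMMAS AND PROOFS =====

-- a maximal run of '-' in cs (global indices, half-open [s, e))
def IsRun (cs : List Char) (s e : Nat) : Prop :=
  s < e ∧ e ≤ cs.length ∧ (∀ k, s ≤ k → k < e → cs[k]? = some '-') ∧
  (s = 0 ∨ cs[s - 1]? ≠ some '-') ∧ (e = cs.length ∨ cs[e]? ≠ some '-')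

lemma isRun_unique {cs : List Char} {s1 e1 s2 e2 n : Nat}
    (h1 : IsRun cs s1 e1) (h2 : IsRun cs s2 e2)
    (m1 : s1 ≤ n ∧ n < e1) (m2 : s2 ≤ n ∧ n < e2) : s1 = s2 ∧ e1 = e2 := by
  obtain ⟨-, he1, hi1, hl1, hr1⟩ := h1
  obtain ⟨-, he2, hi2, hl2, hr2⟩ := h2
  constructor
  · by_contra hne
    rcases Nat.lt_or_ge s1 s2 with h | h
    · rcases hl2 with h0 | hc
      · omega
      · exact hc (hi1 (s2 - 1) (by omega) (by omega))
    · rcases hl1 with h0 | hc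
      · omega
      · exact hc (hi2 (s1 - 1) (by omega) (by omega))
  · by_contra hne
    rcases Nat.lt_or_ge e1 e2 with h | h
    · rcases hr1 with h0 | hc
      · omega
      · exact hc (hi2 e1 (by omega) (by omega))
    · rcases hr2 with h0 | hc
      · omega
      · exact hc (hi1 e2 (by omega) (by omega))

lemma goLeftA_neg (cs : List Char) (fuel : Nat) (x : Int) (hx : x < 0) :
    goLeftA cs fuel x = x := by
  cases fuel with
  | zero => rfl
  | succ f =>
    simp only [goLeftA]
    split_ifs with h
    · exact absurd h.1 (by omega)
    · rfl

lemma goLeftA_spec (cs : List Char) :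
    ∀ (fuel s : Nat), s < fuel →
      ∃ r : Nat, goLeftA cs fuel (s : Int) + 1 = (r : Int) ∧ r ≤ s + 1 ∧
        (∀ k, r ≤ k → k ≤ s → cs[k]? = some '-') ∧
        (r = 0 ∨ cs[r - 1]? ≠ some '-') := by
  intro fuel
  induction fuel with
  | zero => intro s h; omega
  | succ f ih =>
    intro s hs
    simp only [goLeftA]
    split_ifs with h
    · have hc : cs[s]? = some '-' := by
        have := h.2; rwa [PySem.List.pyGet?_natCast] at this
      cases s with
      | zero =>
        rw [show ((0 : Nat) : Int) - 1 = -1 by norm_num, goLeftA_neg cs f (-1) (by omega)]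
        refine ⟨0, by norm_num, by omega, ?_, Or.inl rfl⟩
        intro k h1 h2
        have : k = 0 := by omega
        simpa [this] using hc
      | succ s' =>
        rw [show ((s' + 1 : Nat) : Int) - 1 = (s' : Int) by push_cast; ring]
        obtain ⟨r, hr, hle, hint, hmax⟩ := ih s' (by omega)
        refine ⟨r, hr, by omega, ?_, hmax⟩
        intro k h1 h2
        rcases Nat.lt_or_ge k (s' + 1) with hk | hk
        · exact hint k h1 (by omega)
        · have : k = s' + 1 := by omega
          simpa [this] using hc
    · refine ⟨s + 1, by push_cast; ring, le_refl _, fun k h1 h2 => absurd h1 (by omega), Or.inr ?_⟩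
      push Not at h
      have := h (by positivity)
      rw [PySem.List.pyGet?_natCast] at this
      simpa using this

lemma goRightA_spec (cs : List Char) :
    ∀ (fuel f : Nat), cs.length - f < fuel → f ≤ cs.length →
      ∃ e : Nat, goRightA cs fuel (f : Int) = (e : Int) ∧ f ≤ e ∧ e ≤ cs.length ∧
        (∀ k, f ≤ k → k < e → cs[k]? = some '-') ∧
        (e = cs.length ∨ cs[e]? ≠ some '-') := by
  intro fuel
  induction fuel with
  | zero => intro f h; omega
  | succ fl ih =>
    intro f hf hfle
    simp only [goRightA]
    split_ifs with h
    · have hflt : f < cs.length := by exact_mod_cast h.1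
      have hc : cs[f]? = some '-' := by
        have := h.2; rwa [PySem.List.pyGet?_natCast] at this
      rw [show (f : Int) + 1 = ((f + 1 : Nat) : Int) by push_cast; ring]
      obtain ⟨e, he, hle, hlen, hint, hmax⟩ := ih (f + 1) (by omega) (by omega)
      refine ⟨e, he, by omega, hlen, ?_, hmax⟩
      intro k h1 h2
      rcases Nat.lt_or_ge f k with hk | hk
      · exact hint k (by omega) h2
      · have : k = f := by omega
        simpa [this] using hc
    · push Not at h
      rcases Nat.lt_or_ge f cs.length with hk | hk
      · have := h (by exact_mod_cast hk)
        rw [PySem.List.pyGet?_natCast] at this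
        exact ⟨f, rfl, le_refl _, hfle, fun k h1 h2 => absurd h1 (by omega), Or.inr (by simpa using this)⟩
      · exact ⟨f, rfl, le_refl _, hfle, fun k h1 h2 => absurd h1 (by omega), Or.inl (by omega)⟩

-- all the facts about runsB needed, in one induction
lemma runsB_big (cs : List Char) : ∀ i : Nat,
    ((runsB cs i).Pairwise (fun p q => p.2 < q.1)) ∧
    (∀ p ∈ runsB cs i, i ≤ p.1 ∧ p.1 < p.2 ∧ p.2 ≤ i + cs.length ∧
      (∀ k, p.1 ≤ k → k < p.2 → cs[k - i]? = some '-') ∧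
      (p.1 = i ∨ cs[p.1 - 1 - i]? ≠ some '-') ∧
      (p.2 = i + cs.length ∨ cs[p.2 - i]? ≠ some '-')) ∧
    (∀ n : Nat, cs[n]? = some '-' → ∃ p ∈ runsB cs i, p.1 ≤ i + n ∧ i + n < p.2) := by
  induction cs with
  | nil =>
    intro i
    refine ⟨by simp [runsB], by simp [runsB], ?_⟩
    intro n hn; simp at hn
  | cons c rest ih =>
    intro i
    obtain ⟨ihpw, ihmem, ihcov⟩ := ih (i + 1)
    have shift : ∀ j : Nat, 1 ≤ j → (c :: rest)[j]? = rest[j - 1]? := by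
      intro j hj
      cases j with
      | zero => omega
      | succ j' => simp
    by_cases hc : c = '-'
    · cases hm : runsB rest (i + 1) with
      | nil =>
        have hrun : runsB (c :: rest) i = [(i, i + 1)] := by
          simp only [runsB, if_pos hc, hm]
        have hrest0 : rest = [] ∨ rest[0]? ≠ some '-' := by
          cases hr : rest[0]? with
          | none => left; cases rest with | nil => rfl | cons a l => simp at hr
          | some ch =>
            by_cases hch : ch = '-'
            · obtain ⟨p, hp, -⟩ := ihcov 0 (by rw [hr, hch])
              rw [hm] at hp; simp at hp
            · right; simp [hch]
        refine ⟨by rw [hrun]; simp, ?_, ?_⟩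
        · intro p hp
          rw [hrun] at hp; simp at hp; subst hp
          refine ⟨le_refl _, by omega, by simp only [List.length_cons]; omega, ?_, Or.inl rfl, ?_⟩
          · intro k h1 h2
            have : k = i := by omega
            simp [this, hc]
          · rcases hrest0 with h | h
            · left; simp [h]
            · right
              rw [show i + 1 - i = 1 by omega, shift 1 (le_refl _)]
              simpa using h
        · intro n hn
          cases n with
          | zero =>
            refine ⟨(i, i + 1), by rw [hrun]; simp, by omega, by omega⟩
          | succ n' =>
            obtain ⟨p, hp, -⟩ := ihcov n' (by simpa using hn)
            rw [hm] at hp; simp at hp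
      | cons q tl =>
        obtain ⟨s, e⟩ := q
        have hse := ihmem (s, e) (by rw [hm]; simp)
        obtain ⟨hs1, hs2, hs3, hsint, hsl, hsr⟩ := hse
        simp only at hs1 hs2 hs3 hsint hsl hsr
        have hpwtl : ∀ q' ∈ tl, e < q'.1 := by
          intro q' hq'
          have := ihpw; rw [hm] at this
          exact (List.pairwise_cons.mp this).1 q' hq'
        have htlmem : ∀ p ∈ tl, (i + 1) ≤ p.1 ∧ p.1 < p.2 ∧ p.2 ≤ (i + 1) + rest.length ∧
            (∀ k, p.1 ≤ k → k < p.2 → rest[k - (i + 1)]? = some '-') ∧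
            (p.1 = i + 1 ∨ rest[p.1 - 1 - (i + 1)]? ≠ some '-') ∧
            (p.2 = (i + 1) + rest.length ∨ rest[p.2 - (i + 1)]? ≠ some '-') := by
          intro p hp; exact ihmem p (by rw [hm]; simp [hp])
        -- shared: a tail member p (or non-head member), lifted to c :: rest at offset i
        have lift : ∀ p : Nat × Nat, p ∈ runsB rest (i + 1) → i + 1 < p.1 →
            i ≤ p.1 ∧ p.1 < p.2 ∧ p.2 ≤ i + (c :: rest).length ∧
            (∀ k, p.1 ≤ k → k < p.2 → (c :: rest)[k - i]? = some '-') ∧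
            (p.1 = i ∨ (c :: rest)[p.1 - 1 - i]? ≠ some '-') ∧
            (p.2 = i + (c :: rest).length ∨ (c :: rest)[p.2 - i]? ≠ some '-') := by
          intro p hp hgt
          obtain ⟨h1, h2, h3, hint, hl, hr⟩ := ihmem p hp
          refine ⟨by omega, h2, by simp only [List.length_cons]; omega, ?_, ?_, ?_⟩
          · intro k hk1 hk2
            rw [shift (k - i) (by omega), show k - i - 1 = k - (i + 1) by omega]
            exact hint k hk1 hk2
          · right
            rw [shift (p.1 - 1 - i) (by omega), show p.1 - 1 - i - 1 = p.1 - 1 - (i + 1) by omega]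
            rcases hl with h | h
            · omega
            · exact h
          · rcases hr with h | h
            · left; simp; omega
            · right
              rw [shift (p.2 - i) (by omega), show p.2 - i - 1 = p.2 - (i + 1) by omega]
              exact h
        by_cases hsi : s = i + 1
        · have hrun : runsB (c :: rest) i = (i, e) :: tl := by
            simp only [runsB, if_pos hc, hm, if_pos hsi]
          refine ⟨?_, ?_, ?_⟩
          · rw [hrun]
            refine List.pairwise_cons.mpr ⟨?_, ?_⟩
            · intro q' hq'; exact hpwtl q' hq'
            · have := ihpw; rw [hm] at this
              exact (List.pairwise_cons.mp this).2
          · intro p hp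
            rw [hrun] at hp
            rcases List.mem_cons.mp hp with hp | hp
            · subst hp
              refine ⟨le_refl _, by omega, by simp only [List.length_cons]; omega, ?_, Or.inl rfl, ?_⟩
              · intro k h1 h2
                simp only at h1 h2
                rcases Nat.lt_or_ge k (i + 1) with hk | hk
                · have : k = i := by omega
                  simp [this, hc]
                · rw [shift (k - i) (by omega), show k - i - 1 = k - (i + 1) by omega]
                  exact hsint k (by omega) h2
              · rcases hsr with h | h
                · left; simp; omega
                · right
                  simp only
                  rw [shift (e - i) (by omega), show e - i - 1 = e - (i + 1) by omega]
                  exact h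
            · exact lift p (by rw [hm]; simp [hp]) (by have := hpwtl p hp; omega)
          · intro n hn
            cases n with
            | zero =>
              exact ⟨(i, e), by rw [hrun]; simp, by omega, by omega⟩
            | succ n' =>
              obtain ⟨p, hp, hc1, hc2⟩ := ihcov n' (by simpa using hn)
              rw [hm] at hp
              rcases List.mem_cons.mp hp with hp | hp
              · subst hp
                exact ⟨(i, e), by rw [hrun]; simp, by omega, by omega⟩
              · exact ⟨p, by rw [hrun]; simp [hp], by omega, by omega⟩
        · have hrun : runsB (c :: rest) i = (i, i + 1) :: (s, e) :: tl := by
            simp only [runsB, if_pos hc, hm, if_neg hsi]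
          have hrest0 : rest[0]? ≠ some '-' := by
            intro hr
            obtain ⟨p, hp, hc1, hc2⟩ := ihcov 0 hr
            rw [hm] at hp
            rcases List.mem_cons.mp hp with hp | hp
            · subst hp; simp only at hc1 hc2; omega
            · have := hpwtl p hp; omega
          refine ⟨?_, ?_, ?_⟩
          · rw [hrun]
            refine List.pairwise_cons.mpr ⟨?_, by rw [← hm]; exact ihpw⟩
            intro q' hq'
            rcases List.mem_cons.mp hq' with h | h
            · subst h; simp only; omega
            · have := hpwtl q' h; simp only; omega
          · intro p hp
            rw [hrun] at hp
            rcases List.mem_cons.mp hp with hp | hp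
            · subst hp
              refine ⟨le_refl _, by omega, by simp only [List.length_cons]; omega, ?_, Or.inl rfl, Or.inr ?_⟩
              · intro k h1 h2
                simp only at h1 h2
                have : k = i := by omega
                simp [this, hc]
              · simp only
                rw [shift (i + 1 - i) (by omega), show i + 1 - i - 1 = 0 by omega]
                exact hrest0
            · rcases List.mem_cons.mp hp with hp | hp
              · subst hp
                exact lift (s, e) (by rw [hm]; simp) (by simp only; omega)
              · exact lift p (by rw [hm]; simp [hp]) (by have := hpwtl p hp; omega)
          · intro n hn
            cases n with
            | zero =>
              exact ⟨(i, i + 1), by rw [hrun]; simp, by omega, by omega⟩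
            | succ n' =>
              obtain ⟨p, hp, hc1, hc2⟩ := ihcov n' (by simpa using hn)
              refine ⟨p, ?_, by omega, by omega⟩
              rw [hrun, ← hm]
              simp [hp]
    · have hrun : runsB (c :: rest) i = runsB rest (i + 1) := by
        simp only [runsB, if_neg hc]
      refine ⟨by rw [hrun]; exact ihpw, ?_, ?_⟩
      · intro p hp
        rw [hrun] at hp
        obtain ⟨h1, h2, h3, hint, hl, hr⟩ := ihmem p hp
        refine ⟨by omega, h2, by simp only [List.length_cons]; omega, ?_, ?_, ?_⟩
        · intro k hk1 hk2
          rw [shift (k - i) (by omega), show k - i - 1 = k - (i + 1) by omega]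
          exact hint k hk1 hk2
        · rcases hl with h | h
          · right
            rw [h, show i + 1 - 1 - i = 0 by omega]
            simp [hc]
          · right
            rcases Nat.eq_or_lt_of_le h1 with he1 | he1
            · rw [← he1, show i + 1 - 1 - i = 0 by omega]
              simp [hc]
            · rw [shift (p.1 - 1 - i) (by omega), show p.1 - 1 - i - 1 = p.1 - 1 - (i + 1) by omega]
              exact h
        · rcases hr with h | h
          · left; simp; omega
          · right
            rw [shift (p.2 - i) (by omega), show p.2 - i - 1 = p.2 - (i + 1) by omega]
            exact h
      · intro n hn
        cases n with
        | zero =>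
          rw [List.getElem?_cons_zero] at hn
          exact absurd (Option.some.inj hn) hc
        | succ n' =>
          obtain ⟨p, hp, hc1, hc2⟩ := ihcov n' (by simpa using hn)
          exact ⟨p, by rw [hrun]; exact hp, by omega, by omega⟩

-- ===== VERDICT (by name: the statement is the Claim_ definition above) =====
theorem range_of_minuses_spec : Claim_equal_range_of_minuses := by
  intro equation index_of_minus _ hpre
  obtain ⟨h0, hget⟩ := hpre
  obtain ⟨n, rfl⟩ := Int.eq_ofNat_of_zero_le h0
  set cs := equation.toList with hcs
  have hn : cs[n]? = some '-' := by rwa [PySem.List.pyGet?_natCast] at hget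
  have hlen : n < cs.length := by
    by_contra h
    rw [List.getElem?_eq_none (by omega)] at hn
    simp at hn
  -- A side
  obtain ⟨r, hr, hrle, hrint, hrmax⟩ :=
    goLeftA_spec cs (n + 1) n (by omega)
  obtain ⟨e, he, hele, helen, heint, hemax⟩ :=
    goRightA_spec cs (cs.length + 1) n (by omega) (by omega)
  have hrn : r ≤ n := by
    rcases Nat.lt_or_ge n r with h | h
    · exfalso
      have : r = n + 1 := by omega
      rcases hrmax with h0 | hcπ
      · omega
      · exact hcπ (by rw [this, show n + 1 - 1 = n by omega]; exact hn)
    · exact h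
  have hne : n < e := by
    rcases Nat.lt_or_ge n e with h | h
    · exact h
    · exfalso
      have : e = n := by omega
      rcases hemax with h0 | hcπ
      · omega
      · exact hcπ (by rw [this]; exact hn)
  have hArun : IsRun cs r e := by
    refine ⟨by omega, helen, ?_, hrmax, hemax⟩
    intro k h1 h2
    rcases Nat.lt_or_ge n k with hk | hk
    · exact heint k (by omega) h2
    · exact hrint k h1 hk
  -- B side
  obtain ⟨pw, mem, cov⟩ := runsB_big cs 0
  obtain ⟨q, hq, hq1, hq2⟩ := cov n hn
  simp only [Nat.zero_add] at hq1 hq2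
  have hfind : ∃ p, (runsB cs 0).find?
      (fun p => decide ((p.1 : Int) ≤ ((n : Nat) : Int) ∧ ((n : Nat) : Int) < (p.2 : Int))) = some p := by
    have : ((runsB cs 0).find?
        (fun p => decide ((p.1 : Int) ≤ ((n : Nat) : Int) ∧ ((n : Nat) : Int) < (p.2 : Int)))).isSome := by
      rw [List.find?_isSome]
      refine ⟨q, hq, ?_⟩
      simp only [decide_eq_true_eq]
      constructor <;> [exact_mod_cast hq1; exact_mod_cast hq2]
    exact Option.isSome_iff_exists.mp this
  obtain ⟨p, hp⟩ := hfind
  have hpmem := List.mem_of_find?_eq_some hp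
  have hppred := List.find?_some hp
  simp only [decide_eq_true_eq] at hppred
  have hp1 : p.1 ≤ n := by exact_mod_cast hppred.1
  have hp2 : n < p.2 := by exact_mod_cast hppred.2
  obtain ⟨-, hB2, hB3, hBint, hBl, hBr⟩ := mem p hpmem
  have hBrun : IsRun cs p.1 p.2 := by
    refine ⟨hB2, by omega, ?_, ?_, ?_⟩
    · intro k h1 h2
      have := hBint k h1 h2
      rwa [Nat.sub_zero] at this
    · rcases hBl with h | h
      · left; omega
      · right; rwa [Nat.sub_zero] at h
    · rcases hBr with h | h
      · left; omega
      · right; rwa [Nat.sub_zero] at h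
  obtain ⟨hps, hpe⟩ := isRun_unique hBrun hArun ⟨hp1, hp2⟩ ⟨hrn, hne⟩
  -- assemble
  show _ = range_of_minuses_alt equation _
  simp only [range_of_minuses, range_of_minuses_alt, ← hcs]
  rw [hp]
  have htn : (((n : Nat) : Int)).toNat = n := by simp
  rw [htn, hr, he]
  cases p with
  | mk ps pe =>
    simp only at hps hpe
    rw [hps, hpe]
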